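-- pv_equiv track=rewrite | github.com/hallgrimur1471/programming | google_code_jam/2018/round1b/a_complete_search.py | legal_partitions
-- ===== SOURCE A (Python) =====
-- def legal_partitions(x, M):
--     if M == 0:
--         return [x]
--     r = 0
--     while r < len(x)-1 and x[r] > x[r+1]:
--         r += 1
--     lp = [[]]
--     for i in range(0, r+1):
--         lp += legal_partitions(x[0:i] + [x[i]+1] + x[i+1:], M-1)
--     lp = list(filter(None, lp))
--     return lp
-- ===== SOURCE B (Python) =====
-- def legal_partitions(x, M):
--     results = []
--     stack = [(x, M)]
--     while stack:
--         y, m = stack.pop()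
--         if m == 0:
--             results.append(y)
--             continue
--         r = 0
--         while r < len(y) - 1 and y[r] > y[r + 1]:
--             r += 1
--         for i in range(r, -1, -1):
--             stack.append((y[0:i] + [y[i] + 1] + y[i + 1:], m - 1))
--     return results
-- ===== Notes on version B (the rewrite author's own statement) =====
-- stated objective: alternative
-- what changed: Replaced A's recursive enumeration (seed [[]] list, += of recursive results, trailing filter(None)) by an explicit-stack DFS worklist that pops (x, M) states, emits x when M == 0, and pushes the M-1 child states in reverse so the pre-order concatenation is preserved with no seed list and no filter.
import Mathlib
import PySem

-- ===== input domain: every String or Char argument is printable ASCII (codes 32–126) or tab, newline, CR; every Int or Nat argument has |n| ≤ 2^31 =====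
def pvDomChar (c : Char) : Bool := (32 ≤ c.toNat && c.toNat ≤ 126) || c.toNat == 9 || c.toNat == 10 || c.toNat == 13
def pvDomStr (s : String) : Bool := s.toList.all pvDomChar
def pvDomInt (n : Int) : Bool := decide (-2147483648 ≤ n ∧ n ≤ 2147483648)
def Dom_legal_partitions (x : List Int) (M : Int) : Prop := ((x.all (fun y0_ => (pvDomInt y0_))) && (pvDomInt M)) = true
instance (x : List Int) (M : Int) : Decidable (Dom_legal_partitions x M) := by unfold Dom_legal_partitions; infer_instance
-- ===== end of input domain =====

-- B replaces A's recursive enumeration by an explicit-stack DFS worklist that emits results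
-- directly (no seed list, no filter); objective: alternative (same cost).

-- ===== PORT A =====
-- shared helper: the while loop 'r = 0; while r < len(x)-1 and x[r] > x[r+1]: r += 1'
-- (this code is identical in both Pythons); ported as a structural scan of the list.
def lpRun : List Int → Nat
  | a :: b :: t => if a > b then lpRun (b :: t) + 1 else 0
  | _ => 0

-- shared helper: the expression 'x[0:i] + [x[i]+1] + x[i+1:]' (identical in both Pythons).
-- x[i] is ported with a default 0: in both ports i is always in range when x ≠ []
-- (i ≤ r < len x); Python raises IndexError only for x = [] there, which Pre_ excludes.
def pvChild (x : List Int) (i : Int) : List Int :=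
  PySem.List.slice x (some 0) (some i) ++ [PySem.List.pyGetD x i 0 + 1]
    ++ PySem.List.slice x (some (i + 1)) none

def legal_partitions (x : List Int) (M : Int) : List (List Int) :=
  if M = 0 then [x]
  else if M < 0 then []  -- Python recurses forever here (never returns); totality guard, outside Pre_
  else
    let r := lpRun x
    let lp := (PySem.List.pyRange 0 ((r : Int) + 1) 1).attach.foldl
      (fun lp i => lp ++ legal_partitions (pvChild x i.1) (M - 1)) [[]]
    lp.filter (fun l => !l.isEmpty)
termination_by M.toNat
decreasing_by omega

-- ===== PORT B =====
-- lemmas the worklist loop's termination measure needs (cited by decreasing_by)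
theorem pvChild_length {x : List Int} {i : Nat} (h : i < x.length) :
    (pvChild x (i : Int)).length = x.length := by
  unfold pvChild
  rw [show ((i : Int) + 1) = ((i + 1 : Nat) : Int) by push_cast; ring,
    PySem.List.slice_from_natCast]
  simp [PySem.List.slice_to_natCast]
  omega

theorem lpRun_lt {y : List Int} (h : y ≠ []) : lpRun y < y.length := by
  induction y with
  | nil => simp at h
  | cons a t ih =>
    cases t with
    | nil => simp [lpRun]
    | cons b t' =>
      simp only [lpRun]
      split
      · have := ih (by simp)
        simp at this ⊢; omega
      · simp

-- the loop 'for i in range(r, -1, -1): stack.append((y[0:i]+[y[i]+1]+y[i+1:], m-1))',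
-- pushing the children downward; the stack is a List whose head is its top.
def lpPush (y : List Int) (m' : Nat) : Nat → List (List Int × Nat) → List (List Int × Nat)
  | 0, st => (pvChild y 0, m') :: st
  | i + 1, st => lpPush y m' i ((pvChild y ((i : Int) + 1), m') :: st)

theorem lpPush_eq (y : List Int) (m' : Nat) (i : Nat) (st : List (List Int × Nat)) :
    lpPush y m' i st = (List.range (i + 1)).map (fun (j : Nat) => (pvChild y (j : Int), m')) ++ st := by
  induction i generalizing st with
  | zero => simp [lpPush]
  | succ i ih =>
    rw [lpPush, ih]
    simp [List.range_succ]

-- termination measure for the worklist loop (proof-only quantity, not part of B's algorithm)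
def pvMeasure (st : List (List Int × Nat)) : Nat :=
  (st.map (fun p => (p.1.length + 1) ^ p.2)).sum

theorem pvMeasure_push {y : List Int} (m' r : Nat) (st : List (List Int × Nat))
    (hr : r < y.length) :
    pvMeasure (lpPush y m' r st) = (r + 1) * (y.length + 1) ^ m' + pvMeasure st := by
  rw [lpPush_eq]
  unfold pvMeasure
  rw [List.map_append, List.sum_append, List.map_map]
  congr 1
  rw [show ((fun p : List Int × Nat => (p.1.length + 1) ^ p.2)
        ∘ (fun j : Nat => (pvChild y (j : Int), m')))
      = fun j : Nat => ((pvChild y (j : Int)).length + 1) ^ m' from rfl]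
  rw [List.map_congr_left (g := fun _ => (y.length + 1) ^ m')
    (by intro j hj
        rw [List.mem_range] at hj
        rw [pvChild_length (by omega : j < y.length)])]
  simp [List.map_const']

-- the worklist loop: pop a state, emit it at m = 0, else push its children
def lpGo (results : List (List Int)) (stack : List (List Int × Nat)) : List (List Int) :=
  match stack with
  | [] => results
  | (y, m) :: rest =>
    match m with
    | 0 => lpGo (results ++ [y]) rest
    | m' + 1 =>
      if y = [] then lpGo results rest  -- Python raises IndexError here (outside Pre_); totality guard
      else lpGo results (lpPush y m' (lpRun y) rest)
termination_by pvMeasure stack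
decreasing_by
  · simp [pvMeasure]
  · simp only [pvMeasure, List.map_cons, List.sum_cons]
    have : 0 < (y.length + 1) ^ (m' + 1) := by positivity
    simp only [Nat.succ_eq_add_one]
    omega
  · rename_i hy
    rw [pvMeasure_push _ _ _ (lpRun_lt hy)]
    simp only [pvMeasure, List.map_cons, List.sum_cons, Nat.succ_eq_add_one]
    have h1 : lpRun y + 1 ≤ y.length := lpRun_lt hy
    have h2 : 0 < (y.length + 1) ^ m' := by positivity
    have : (lpRun y + 1) * (y.length + 1) ^ m' < (y.length + 1) ^ (m' + 1) := by
      calc (lpRun y + 1) * (y.length + 1) ^ m'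
          < (y.length + 1) * (y.length + 1) ^ m' :=
            Nat.mul_lt_mul_of_lt_of_le (by omega) (le_refl _) h2
        _ = (y.length + 1) ^ (m' + 1) := by ring
    omega

def legal_partitions_alt (x : List Int) (M : Int) : List (List Int) :=
  if M < 0 then []  -- Python never returns here (outside Pre_); totality guard
  else lpGo [] [(x, M.toNat)]

-- ===== PRECONDITION & SPEC =====
-- Pre_ excludes exactly the inputs where Python A never returns normally: M < 0 (unbounded
-- recursion) and x = [] with M ≠ 0 (IndexError at x[0]).
def Pre_legal_partitions (x : List Int) (M : Int) : Prop := 0 ≤ M ∧ (x = [] → M = 0)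
instance (x : List Int) (M : Int) : Decidable (Pre_legal_partitions x M) := by
  unfold Pre_legal_partitions; infer_instance

def pvWitness_legal_partitions : List Int × Int := ([3, 1, 2], 2)

def Spec_legal_partitions (x : List Int) (M : Int) (out : List (List Int)) : Prop := out = legal_partitions_alt x M
instance (x : List Int) (M : Int) (out : List (List Int)) : Decidable (Spec_legal_partitions x M out) := by unfold Spec_legal_partitions; infer_instance

-- ===== CLAIM (what is proved, stated in full; the proofs are below) =====
def Claim_equal_legal_partitions : Prop := ∀ (x : List Int) (M : Int), Dom_legal_partitions x M → Pre_legal_partitions x M → Spec_legal_partitions x M (legal_partitions x M)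

-- ===== LEMMAS AND PROOFS =====

-- common denotation: the DFS pre-order list of the completed (M = 0) states
mutual
def pvF : Nat → List Int → List (List Int)
  | 0, x => [x]
  | m + 1, x => pvFs m x (List.range (lpRun x + 1))
  termination_by m _ => (m, 0)
def pvFs : Nat → List Int → List Nat → List (List Int)
  | _, _, [] => []
  | m, x, i :: is => pvF m (pvChild x (i : Int)) ++ pvFs m x is
  termination_by m _ is => (m, is.length + 1)
end

theorem pvFs_eq_flatMap (m : Nat) (x : List Int) (is : List Nat) :
    pvFs m x is = is.flatMap (fun (i : Nat) => pvF m (pvChild x (i : Int))) := by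
  induction is with
  | nil => simp [pvFs]
  | cons i is ih => rw [pvFs, ih, List.flatMap_cons]

theorem pvF_mem_length {m : Nat} {x l : List Int} (hx : x ≠ []) (h : l ∈ pvF m x) :
    l.length = x.length := by
  induction m generalizing x with
  | zero => rw [pvF, List.mem_singleton] at h; simp [h]
  | succ m ih =>
    rw [pvF, pvFs_eq_flatMap, List.mem_flatMap] at h
    obtain ⟨i, hi, hl⟩ := h
    rw [List.mem_range] at hi
    have hilt : i < x.length := by have := lpRun_lt hx; omega
    have hcl := pvChild_length hilt
    have hcne : pvChild x (i : Int) ≠ [] := by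
      intro he; rw [he] at hcl; simp at hcl; omega
    rw [ih hcne hl, hcl]

theorem legal_partitions_eq_pvF (m : Nat) (x : List Int) (hx : x ≠ [] ∨ m = 0) :
    legal_partitions x (m : Int) = pvF m x := by
  induction m generalizing x with
  | zero => rw [legal_partitions]; simp [pvF]
  | succ m ih =>
    have hx' : x ≠ [] := by
      rcases hx with h | h
      · exact h
      · exact absurd h (by omega)
    rw [show ((m + 1 : Nat) : Int) = (m : Int) + 1 by push_cast; ring, legal_partitions]
    rw [if_neg (by omega), if_neg (by omega)]
    simp only [add_sub_cancel_right]
    rw [List.foldl_attach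
      (f := fun lp i => lp ++ legal_partitions (pvChild x i) (m : Int))]
    rw [PySem.List.foldl_append_eq_flatMap]
    rw [show PySem.List.pyRange 0 ((lpRun x : Int) + 1) 1
        = (List.range (lpRun x + 1)).map (fun k : Nat => (k : Int)) by
      rw [PySem.List.pyRange_one]; norm_num]
    rw [List.flatMap_map, pvF, pvFs_eq_flatMap]
    rw [List.flatMap_congr (g := fun (i : Nat) => pvF m (pvChild x (i : Int)))
      (by intro i hi
          rw [List.mem_range] at hi
          have hilt : i < x.length := by have := lpRun_lt hx'; omega
          have hcl := pvChild_length hilt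
          exact ih (pvChild x (i : Int)) (Or.inl (by intro he; rw [he] at hcl; simp at hcl; omega)))]
    rw [List.filter_append]
    have h1 : List.filter (fun l => !l.isEmpty) [([] : List Int)] = [] := by simp
    have h2 : ∀ L : List (List Int),
        (∀ l ∈ L, l ≠ []) → List.filter (fun l => !l.isEmpty) L = L := by
      intro L hL
      rw [List.filter_eq_self]
      intro a ha
      simpa using hL a ha
    rw [h1, h2, List.nil_append]
    intro l hl
    rw [List.mem_flatMap] at hl
    obtain ⟨i, hi, hl⟩ := hl
    rw [List.mem_range] at hi
    have hilt : i < x.length := by have := lpRun_lt hx'; omega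
    have hcl := pvChild_length hilt
    have hcne : pvChild x (i : Int) ≠ [] := by intro he; rw [he] at hcl; simp at hcl; omega
    have := pvF_mem_length hcne hl
    intro he; rw [he] at this; simp at this; omega

theorem lpGo_eq : ∀ (results : List (List Int)) (stack : List (List Int × Nat)),
    (∀ p ∈ stack, p.1 ≠ [] ∨ p.2 = 0) →
    lpGo results stack = results ++ stack.flatMap (fun p => pvF p.2 p.1) := by
  intro results stack
  induction results, stack using lpGo.induct with
  | case1 results => intro _; simp [lpGo]
  | case2 results y rest ih =>
    intro h
    rw [lpGo, ih (fun p hp => h p (List.mem_cons_of_mem _ hp))]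
    simp [pvF]
  | case3 results rest m' ih =>
    intro h
    have := h ([], m' + 1) List.mem_cons_self
    simp at this
  | case4 results y rest m' hy ih =>
    intro h
    rw [lpGo, if_neg hy]
    rw [ih]
    · rw [lpPush_eq, List.flatMap_cons, List.flatMap_append, List.flatMap_map]
      simp only [pvF, pvFs_eq_flatMap]
    · intro p hp
      rw [lpPush_eq, List.mem_append] at hp
      rcases hp with hp | hp
      · rw [List.mem_map] at hp
        obtain ⟨j, hj, hpe⟩ := hp
        rw [List.mem_range] at hj
        have hjlt : j < y.length := by have := lpRun_lt hy; omega
        have hcl := pvChild_length hjlt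
        left
        rw [← hpe]
        intro he; simp only at he; rw [he] at hcl; simp at hcl
        exact hy (List.length_eq_zero_iff.mp hcl.symm)
      · exact h p (List.mem_cons_of_mem _ hp)

-- ===== VERDICT (by name: the statement is the Claim_ definition above) =====
theorem legal_partitions_spec : Claim_equal_legal_partitions := by
  intro x M _ hpre
  obtain ⟨hM, hxe⟩ := hpre
  unfold Spec_legal_partitions legal_partitions_alt
  rw [if_neg (by omega)]
  rw [lpGo_eq _ _ (by
    intro p hp
    rw [List.mem_singleton] at hp
    subst hp
    by_cases h : x = []
    · right; simp [hxe h]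
    · left; exact h)]
  have := legal_partitions_eq_pvF M.toNat x (by
    by_cases h : x = []
    · right; simp [hxe h]
    · left; exact h)
  rw [Int.toNat_of_nonneg hM] at this
  simp [this]
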